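-- pv_equiv track=rewrite | github.com/gulecserkan/Okul-Projesi | kutuphane_desktop/printing/template_renderer.py | code128_encode_b
-- ===== SOURCE A (Python) =====
-- def code128_encode_b(text: str):
--     codes = [104]
--     for ch in text:
--         o = ord(ch)
--         if 32 <= o <= 126:
--             codes.append(o - 32)
--         else:
--             codes.append(0)
--     checksum = 104
--     for i, code in enumerate(codes[1:], start=1):
--         checksum += code * i
--     checksum %= 103
--     codes.append(checksum)
--     codes.append(106)
--     return codes
-- ===== SOURCE B (Python) =====
-- def code128_encode_b(text: str):
--     # Right-to-left scan using the suffix-sum identity: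
--     # sum(v_i * i) == sum over positions of the suffix sums, so no
--     # positional index or multiplication is needed.
--     vals = []
--     s = 0  # running suffix sum of symbol values
--     w = 0  # running weighted total (accumulated suffix sums)
--     for ch in reversed(text):
--         o = ord(ch)
--         v = o - 32 if 32 <= o <= 126 else 0
--         vals.append(v)
--         w += v + s
--         s += v
--     vals.reverse()
--     return [104] + vals + [(104 + w) % 103, 106]
-- ===== Notes on version B (the rewrite author's own statement) =====
-- stated objective: alternative
-- what changed: B scans the string right-to-left and computes the weighted checksum via the suffix-sum identity (sum(v_i*i) equals the sum of all suffix sums), maintaining only a running suffix sum and its accumulation, so the positional index and the index multiplication of A disappear; the value list is built back-to-front and reversed.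
import Mathlib
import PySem

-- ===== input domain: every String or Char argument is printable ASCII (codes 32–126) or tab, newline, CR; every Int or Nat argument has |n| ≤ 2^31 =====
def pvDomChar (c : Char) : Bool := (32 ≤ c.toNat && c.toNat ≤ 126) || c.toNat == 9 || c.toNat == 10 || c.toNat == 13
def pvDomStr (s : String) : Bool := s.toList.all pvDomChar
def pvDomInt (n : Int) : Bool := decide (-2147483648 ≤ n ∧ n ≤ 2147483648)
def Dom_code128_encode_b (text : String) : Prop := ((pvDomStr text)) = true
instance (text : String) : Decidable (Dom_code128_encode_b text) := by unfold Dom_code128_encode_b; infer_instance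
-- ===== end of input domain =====

-- B replaces A's index-weighted rescan by a right-to-left pass using the suffix-sum identity
-- (sum v_i*i = sum of suffix sums), an alternative decomposition of the same cost.

-- ===== PORT A =====
def code128_encode_b (text : String) : List Int :=
  let codes : List Int := text.toList.foldl (fun acc ch =>
    let o : Int := ch.toNat
    if 32 ≤ o ∧ o ≤ 126 then acc ++ [o - 32] else acc ++ [0]) [104]
  let checksum : Int := ((codes.drop 1).zipIdx 1).foldl
    (fun s p => s + p.1 * (p.2 : Int)) 104
  codes ++ [PySem.Int.mod checksum 103, 106]

-- ===== PORT B =====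
-- state: (vals built in scan order, running suffix sum s, accumulated weighted total w)
def code128B_step (st : List Int × Int × Int) (ch : Char) : List Int × Int × Int :=
  let o : Int := ch.toNat
  let v : Int := if 32 ≤ o ∧ o ≤ 126 then o - 32 else 0
  (st.1 ++ [v], st.2.1 + v, st.2.2 + v + st.2.1)

def code128_encode_b_alt (text : String) : List Int :=
  let r := text.toList.reverse.foldl code128B_step ([], 0, 0)
  [104] ++ r.1.reverse ++ [PySem.Int.mod (104 + r.2.2) 103, 106]

-- ===== PRECONDITION & SPEC =====
def Spec_code128_encode_b (text : String) (out : List Int) : Prop := out = code128_encode_b_alt text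
instance (text : String) (out : List Int) : Decidable (Spec_code128_encode_b text out) := by unfold Spec_code128_encode_b; infer_instance

-- ===== CLAIM (what is proved, stated in full; the proofs are below) =====
def Claim_equal_code128_encode_b : Prop := ∀ (text : String), Dom_code128_encode_b text → Spec_code128_encode_b text (code128_encode_b text)

-- ===== LEMMAS AND PROOFS =====

def pvVal (ch : Char) : Int :=
  let o : Int := ch.toNat
  if 32 ≤ o ∧ o ≤ 126 then o - 32 else 0

def pvSum (cs : List Char) : Int := (cs.map pvVal).sum

def pvW : List Char → Int
  | [] => 0
  | c :: rest => pvVal c + pvSum rest + pvW rest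

theorem pv_foldlA (cs : List Char) (init : List Int) :
    cs.foldl (fun acc ch =>
      let o : Int := ch.toNat
      if 32 ≤ o ∧ o ≤ 126 then acc ++ [o - 32] else acc ++ [0]) init
      = init ++ cs.map pvVal := by
  induction cs generalizing init with
  | nil => simp
  | cons c rest ih =>
    simp only [List.foldl_cons]
    rw [ih, List.map_cons]
    unfold pvVal
    split <;> simp_all

theorem pv_foldl_shift (l : List (Int × Nat)) (a : Int) :
    l.foldl (fun s p => s + p.1 * (p.2 : Int)) a
      = a + l.foldl (fun s p => s + p.1 * (p.2 : Int)) 0 := by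
  induction l generalizing a with
  | nil => simp
  | cons x rest ih =>
    simp only [List.foldl_cons]
    rw [ih, ih (0 + x.1 * (x.2 : Int))]
    ring

-- A's rescan, generalized over the start index: weighted sum with weights k, k+1, …
theorem pv_checksumA (cs : List Char) (k : Nat) :
    ((cs.map pvVal).zipIdx k).foldl (fun s p => s + p.1 * (p.2 : Int)) 0
      = pvW cs + ((k : Int) - 1) * pvSum cs := by
  induction cs generalizing k with
  | nil => simp [pvW, pvSum]
  | cons c rest ih =>
    simp only [List.map_cons, List.zipIdx_cons, List.foldl_cons]
    rw [pv_foldl_shift, ih (k + 1)]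
    simp only [pvW, pvSum, List.map_cons, List.sum_cons]
    push_cast
    ring

-- B's reverse fold, characterized from the original string's viewpoint
theorem pv_loopB (cs : List Char) (vals0 : List Int) (s0 w0 : Int) :
    cs.reverse.foldl code128B_step (vals0, s0, w0)
      = (vals0 ++ (cs.map pvVal).reverse,
         s0 + pvSum cs,
         w0 + pvW cs + (cs.length : Int) * s0) := by
  induction cs generalizing vals0 s0 w0 with
  | nil => simp [pvSum, pvW]
  | cons c rest ih =>
    simp only [List.reverse_cons, List.foldl_append, List.foldl_cons, List.foldl_nil]
    rw [ih]
    simp only [code128B_step, pvVal, pvSum, pvW, List.map_cons, List.sum_cons,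
      List.reverse_cons, List.length_cons, List.append_assoc]
    refine Prod.ext rfl (Prod.ext ?_ ?_) <;> push_cast <;> ring

theorem code128_encode_b_eq (text : String) :
    code128_encode_b text = code128_encode_b_alt text := by
  unfold code128_encode_b code128_encode_b_alt
  rw [pv_foldlA, pv_loopB]
  simp only [List.cons_append, List.nil_append, List.drop_succ_cons, List.drop_zero,
    List.reverse_reverse, List.nil_append]
  rw [pv_foldl_shift, pv_checksumA]
  norm_num

-- ===== VERDICT (by name: the statement is the Claim_ definition above) =====
theorem code128_encode_b_spec : Claim_equal_code128_encode_b := by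
  intro text _
  unfold Spec_code128_encode_b
  exact code128_encode_b_eq text
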